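-- pv_equiv track=rewrite | github.com/cutajarj/CodilityInPython | solutions/primeandcompositenumbers/flags.py | can_place_flags
-- ===== SOURCE A (Python) =====
-- def can_place_flags(peaks, flags_to_place):
--     current_position = 0
--     total_flags = flags_to_place
--     while current_position < len(peaks) - 1 and total_flags > 0:
--         if peaks[current_position]:
--             total_flags -= 1
--             current_position += flags_to_place
--         else:
--             current_position += 1
--     return total_flags == 0
-- ===== SOURCE B (Python) =====
-- def can_place_flags(peaks, flags_to_place):
--     if flags_to_place <= 0:
--         return flags_to_place == 0
--     m = len(peaks) - 1            # usable cells are 0..m-1 (the original never reads the last one)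
--     if m <= 0:
--         return False
--     # next_peak[i] = smallest truthy index j with i <= j < m, or m if none (right-to-left pass)
--     next_peak = [m] * (m + 1)
--     for i in range(m - 1, -1, -1):
--         next_peak[i] = i if peaks[i] else next_peak[i + 1]
--     placed, pos = 0, 0
--     while placed < flags_to_place and pos < m and next_peak[pos] < m:
--         pos = next_peak[pos] + flags_to_place
--         placed += 1
--     return placed == flags_to_place
-- ===== Notes on version B (the rewrite author's own statement) =====
-- stated objective: alternative
-- what changed: B precomputes a next-peak lookup table in one right-to-left pass and then jumps directly from peak to peak (at most flags_to_place table lookups), instead of A's single while-loop that walks cell by cell searching for the next truthy peak.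
import Mathlib
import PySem

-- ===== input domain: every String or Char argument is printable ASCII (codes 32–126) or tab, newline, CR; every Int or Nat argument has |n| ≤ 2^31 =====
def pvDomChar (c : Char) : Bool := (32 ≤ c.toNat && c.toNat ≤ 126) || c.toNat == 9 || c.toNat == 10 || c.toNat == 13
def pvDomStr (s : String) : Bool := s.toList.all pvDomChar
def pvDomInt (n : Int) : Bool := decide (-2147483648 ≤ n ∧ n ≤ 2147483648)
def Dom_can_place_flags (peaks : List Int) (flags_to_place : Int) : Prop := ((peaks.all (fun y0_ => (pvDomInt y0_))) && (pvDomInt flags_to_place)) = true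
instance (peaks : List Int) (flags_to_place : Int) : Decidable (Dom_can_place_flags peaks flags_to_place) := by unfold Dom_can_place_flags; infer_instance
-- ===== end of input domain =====

-- B precomputes a next-peak lookup table (one right-to-left pass) and then jumps peak to
-- peak with at most flags_to_place table lookups, instead of A's cell-by-cell walk;
-- objective: alternative decomposition, same O(n) cost.

-- ===== PORT A =====
-- A's while loop, ported with fuel. The fuel peaks.length + 1 never runs out on the
-- actual call: the loop runs only while total_flags > 0, which forces flags_to_place ≥ 1,
-- so current_position strictly increases each iteration and the loop does at most
-- peaks.length - 1 iterations. peaks[current_position] is always in range there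
-- (0 ≤ pos < len - 1), so pyGet? … |>.getD 0 is exact on every reachable state.
def cpfLoopA (peaks : List Int) (f : Int) : Nat → Int → Int → Bool
  | 0, _, total => total == 0
  | fuel + 1, pos, total =>
    if pos < (peaks.length : Int) - 1 ∧ total > 0 then
      if ((PySem.List.pyGet? peaks pos).getD 0) ≠ 0 then
        cpfLoopA peaks f fuel (pos + f) (total - 1)
      else
        cpfLoopA peaks f fuel (pos + 1) total
    else total == 0

def can_place_flags (peaks : List Int) (flags_to_place : Int) : Bool :=
  cpfLoopA peaks flags_to_place (peaks.length + 1) 0 flags_to_place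

-- ===== PORT B =====
-- the next_peak table: Python fills it right-to-left over indices m-1..0; here the same
-- table (next_peak[i] = i if peaks[i] else next_peak[i+1], sentinel m at the end) is
-- built by structural recursion on the list of usable cells peaks[:m], carrying index i
def cpfNext (m : Int) : Int → List Int → List Int
  | _, [] => [m]
  | i, p :: rest =>
    (if p ≠ 0 then i else (cpfNext m (i + 1) rest).headD m) :: cpfNext m (i + 1) rest

-- the while loop: at most flags_to_place iterations (placed grows by 1 each time), so
-- fuel f.toNat suffices; pos is never negative on reachable states, and the table read
-- next_peak[pos] is only relevant when pos < m (in range), so pyGetD with default m is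
-- exact there (Python short-circuits the read when pos >= m)
def cpfJump (np : List Int) (m f : Int) : Nat → Int → Int → Bool
  | 0, placed, _ => placed == f
  | fuel + 1, placed, pos =>
    if placed < f ∧ pos < m ∧ PySem.List.pyGetD np pos m < m then
      cpfJump np m f fuel (placed + 1) (PySem.List.pyGetD np pos m + f)
    else placed == f

def can_place_flags_alt (peaks : List Int) (flags_to_place : Int) : Bool :=
  if flags_to_place ≤ 0 then flags_to_place == 0
  else
    let m : Int := (peaks.length : Int) - 1
    if m ≤ 0 then false
    else cpfJump (cpfNext m 0 peaks.dropLast) m flags_to_place flags_to_place.toNat 0 0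

-- ===== PRECONDITION & SPEC =====
def Spec_can_place_flags (peaks : List Int) (flags_to_place : Int) (out : Bool) : Prop := out = can_place_flags_alt peaks flags_to_place
instance (peaks : List Int) (flags_to_place : Int) (out : Bool) : Decidable (Spec_can_place_flags peaks flags_to_place out) := by unfold Spec_can_place_flags; infer_instance

-- ===== CLAIM (what is proved, stated in full; the proofs are below) =====
def Claim_equal_can_place_flags : Prop := ∀ (peaks : List Int) (flags_to_place : Int), Dom_can_place_flags peaks flags_to_place → Spec_can_place_flags peaks flags_to_place (can_place_flags peaks flags_to_place)

-- ===== LEMMAS AND PROOFS =====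

-- specification of the table entries: first truthy index ≥ i among the cells, else m
def cpfFt (m : Int) : Int → List Int → Int
  | _, [] => m
  | i, p :: rest => if p ≠ 0 then i else cpfFt m (i + 1) rest

-- A's loop with 0 flags left returns true regardless of fuel/position
lemma cpfLoopA_zero (peaks : List Int) (f : Int) (fuel : Nat) (pos : Int) :
    cpfLoopA peaks f fuel pos 0 = true := by
  cases fuel <;> simp [cpfLoopA]

-- B's loop with all flags placed returns true regardless of fuel/position
lemma cpfJump_done (np : List Int) (m f : Int) (fuel : Nat) (pos : Int) :
    cpfJump np m f fuel f pos = true := by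
  cases fuel <;> simp [cpfJump]

lemma cpfNext_head (m : Int) : ∀ (l : List Int) (i : Int),
    (cpfNext m i l).head?.getD m = cpfFt m i l := by
  intro l
  induction l with
  | nil => intro i; simp [cpfNext, cpfFt]
  | cons p rest ih => intro i; by_cases hp : p ≠ 0 <;> simp [cpfNext, cpfFt, hp, ih]

lemma cpfNext_length (m : Int) : ∀ (l : List Int) (i : Int),
    (cpfNext m i l).length = l.length + 1 := by
  intro l
  induction l with
  | nil => intro i; simp [cpfNext]
  | cons p rest ih => intro i; simp [cpfNext, ih]

lemma cpfNext_getD (m : Int) : ∀ (l : List Int) (i : Int) (j : Nat), j ≤ l.length →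
    (cpfNext m i l).getD j m = cpfFt m (i + j) (l.drop j) := by
  intro l
  induction l with
  | nil =>
    intro i j hj
    have hj0 : j = 0 := by simpa using hj
    subst hj0
    simp [cpfNext, cpfFt]
  | cons p rest ih =>
    intro i j hj
    cases j with
    | zero =>
      by_cases hp : p ≠ 0 <;>
        simp [cpfNext, cpfFt, hp, List.getD, cpfNext_head]
    | succ j =>
      have := ih (i + 1) j (by simpa using hj)
      simp only [cpfNext, List.getD_cons_succ, List.drop_succ_cons]
      rw [this]
      congr 1
      omega

-- the table read, as pyGetD at a nonnegative in-range position
lemma cpfNext_pyGetD (m : Int) (l : List Int) (pos : Int)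
    (h0 : 0 ≤ pos) (h1 : pos ≤ (l.length : Int)) :
    PySem.List.pyGetD (cpfNext m 0 l) pos m = cpfFt m pos (l.drop pos.toNat) := by
  have hlen : pos < ((cpfNext m 0 l).length : Int) := by rw [cpfNext_length]; push_cast; omega
  rw [PySem.List.pyGetD_eq_getElem _ _ h0 hlen,
      ← List.getD_eq_getElem (cpfNext m 0 l) m (by omega)]
  have := cpfNext_getD m l 0 pos.toNat (by omega)
  rw [this, show (0 : Int) + (pos.toNat : Int) = pos from by omega]

-- main invariant: A's scanning loop at state (pos, total) equals B's jump loop at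
-- state (placed = f - total, pos), over the table built from peaks.dropLast
lemma cpf_main (peaks : List Int) (f : Int) (hf : 1 ≤ f) :
    ∀ (fuelA : Nat) (pos total : Int) (fuelB : Nat), 0 ≤ pos → 1 ≤ total → total ≤ f →
      total.toNat ≤ fuelB → (peaks.length : Int) - 1 - pos < fuelA →
      cpfLoopA peaks f fuelA pos total
        = cpfJump (cpfNext ((peaks.length : Int) - 1) 0 peaks.dropLast)
            ((peaks.length : Int) - 1) f fuelB (f - total) pos := by
  intro fuelA
  set m : Int := (peaks.length : Int) - 1 with hm
  set dl : List Int := peaks.dropLast with hdl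
  have hdll : (dl.length : Int) = max m 0 := by
    rw [hdl, hm]; simp [List.length_dropLast]; omega
  induction fuelA with
  | zero =>
    intro pos total fuelB hpos ht htf hfb hfuel
    obtain ⟨fb, rfl⟩ : ∃ fb, fuelB = fb + 1 := ⟨fuelB - 1, by omega⟩
    simp only [cpfLoopA, cpfJump]
    rw [if_neg (fun h => absurd h.2.1 (by omega))]
    simp
  | succ fuelA ih =>
    intro pos total fuelB hpos ht htf hfb hfuel
    obtain ⟨fb, rfl⟩ : ∃ fb, fuelB = fb + 1 := ⟨fuelB - 1, by omega⟩
    by_cases hlt : pos < m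
    · -- A's loop body runs; pos is in range of dropLast
      have hlen : pos.toNat < dl.length := by omega
      have hget : (PySem.List.pyGet? peaks pos).getD 0 = dl[pos.toNat] := by
        rw [PySem.List.pyGet?_eq_some_getElem peaks hpos (by omega)]
        simp [hdl, List.getElem_dropLast]
      have hnp : PySem.List.pyGetD (cpfNext m 0 dl) pos m = cpfFt m pos (dl.drop pos.toNat) :=
        cpfNext_pyGetD m dl pos hpos (by omega)
      have hdrop : dl.drop pos.toNat = dl[pos.toNat] :: dl.drop (pos.toNat + 1) :=
        List.drop_eq_getElem_cons hlen
      simp only [cpfLoopA, hget]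
      rw [if_pos (show pos < (peaks.length : Int) - 1 ∧ total > 0 from ⟨by omega, by omega⟩)]
      by_cases hp : dl[pos.toNat] ≠ 0
      · -- truthy cell: the table entry is pos itself; both sides place a flag here
        have hft : cpfFt m pos (dl.drop pos.toNat) = pos := by
          rw [hdrop]; simp [cpfFt, hp]
        rw [if_pos hp]
        simp only [cpfJump, hnp, hft]
        rw [if_pos (show f - total < f ∧ pos < m ∧ pos < m from ⟨by omega, hlt, hlt⟩)]
        by_cases hone : total = 1
        · subst hone
          rw [show (1 : Int) - 1 = 0 from by norm_num, cpfLoopA_zero,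
              show f - 1 + 1 = f from by ring, cpfJump_done]
        · rw [ih (pos + f) (total - 1) fb (by omega) (by omega) (by omega) (by omega) (by omega)]
          congr 1
          omega
      · -- zero cell: A walks one step; B's table entry at pos equals the one at pos+1
        have hft : cpfFt m pos (dl.drop pos.toNat) = cpfFt m (pos + 1) (dl.drop (pos + 1).toNat) := by
          rw [hdrop, show (pos + 1).toNat = pos.toNat + 1 from by omega]
          simp [cpfFt, hp]
        rw [if_neg hp, ih (pos + 1) total (fb + 1) (by omega) ht htf hfb (by omega)]
        by_cases hend : pos + 1 < m
        · -- pos+1 still usable: the two lookups coincide, guards agree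
          have hnp' : PySem.List.pyGetD (cpfNext m 0 dl) (pos + 1) m
              = cpfFt m (pos + 1) (dl.drop (pos + 1).toNat) :=
            cpfNext_pyGetD m dl (pos + 1) (by omega) (by omega)
          simp only [cpfJump, hnp, hnp', hft]
          by_cases hj : cpfFt m (pos + 1) (dl.drop (pos + 1).toNat) < m
          · rw [if_pos ⟨show f - total < f from by omega, hend, hj⟩,
                if_pos ⟨show f - total < f from by omega, hlt, hj⟩]
          · rw [if_neg (fun h => hj h.2.2), if_neg (fun h => hj h.2.2)]
        · -- pos+1 = m: no truthy cell remains after pos; both guards are false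
          have hempty : dl.drop (pos + 1).toNat = [] := List.drop_eq_nil_of_le (by omega)
          have hftm : cpfFt m pos (dl.drop pos.toNat) = m := by rw [hft, hempty]; simp [cpfFt]
          have hftm' : cpfFt m (pos + 1) (dl.drop (pos + 1).toNat) = m := by
            rw [hempty]; simp [cpfFt]
          by_cases hrange : pos + 1 ≤ (dl.length : Int)
          · have hnp' : PySem.List.pyGetD (cpfNext m 0 dl) (pos + 1) m
                = cpfFt m (pos + 1) (dl.drop (pos + 1).toNat) :=
              cpfNext_pyGetD m dl (pos + 1) (by omega) hrange
            simp only [cpfJump, hnp, hnp', hftm, hftm']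
            rw [if_neg (fun h => absurd h.2.2 (by omega)),
                if_neg (fun h => absurd h.2.2 (by omega))]
          · exact absurd hrange (by omega)
    · -- pos past the usable range: both loops stop with flags unplaced
      simp only [cpfLoopA, cpfJump]
      rw [if_neg (fun (h : pos < (peaks.length : Int) - 1 ∧ total > 0) => absurd h.1 (by omega)),
          if_neg (fun h => absurd h.2.1 hlt)]
      simp

-- ===== VERDICT (by name: the statement is the Claim_ definition above) =====
theorem can_place_flags_spec : Claim_equal_can_place_flags := by
  intro peaks f _
  unfold Spec_can_place_flags can_place_flags can_place_flags_alt
  by_cases hf : f ≤ 0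
  · rw [if_pos hf]
    simp only [cpfLoopA]
    rw [if_neg (fun (h : (0 : Int) < (peaks.length : Int) - 1 ∧ f > 0) => absurd h.2 (by omega))]
  · rw [if_neg hf]
    by_cases hm : (peaks.length : Int) - 1 ≤ 0
    · simp only [if_pos hm, cpfLoopA]
      rw [if_neg (fun (h : (0 : Int) < (peaks.length : Int) - 1 ∧ f > 0) => absurd h.1 (by omega))]
      simp; omega
    · simp only [if_neg hm]
      have := cpf_main peaks f (by omega) (peaks.length + 1) 0 f f.toNat le_rfl
        (by omega) le_rfl le_rfl (by push_cast; omega)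
      rw [show f - f = 0 from by ring] at this
      simpa using this
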